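-- pv_equiv track=rewrite | github.com/tetras92/MOMA | CORE/ITOR_XP/XP-General-m7-8.py | check_int_List_2
-- ===== SOURCE A (Python) =====
-- m = 8
--
-- def check_int_List_2(int_List):
--     A_binary_encoding_list = [integer_to_bin(val_int) for val_int in int_List]
--     """absence de dominance"""
--     for alt1 in A_binary_encoding_list:
--         for alt2 in A_binary_encoding_list:
--             if alt2 != alt1:
--                 alt1_int = [int(alt1[i]) for i in range(m)]
--                 alt2_int = [int(alt2[i]) for i in range(m)]
--                 if all([alt1_int[i] >= alt2_int[i] for i in range(m)]) or all(
--                         [alt2_int[i] >= alt1_int[i] for i in range(m)]):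
--                     return False
--     return True
--
-- def integer_to_bin(val_int):
--     return format(val_int, "b").zfill(m)
-- ===== SOURCE B (Python) =====
-- m = 8
--
-- def check_int_List_2(int_List):
--     present = set(int_List)
--     for u in range(1 << m):
--         if u in present:
--             for s in range(u):
--                 if s in present and s & u == s:
--                     return False
--     return True
-- ===== Notes on version B (the rewrite author's own statement) =====
-- stated objective: faster
-- what changed: B builds a set of the values in one pass and then scans the fixed 256-value universe once, checking for each present u only the values s < u that are submasks of u (s & u == s, the integer form of domination), instead of A's double loop over all ordered pairs of list entries with per-pair string re-encoding and 8-character comparisons; …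
-- outside the precondition, e.g. on check_int_List_2([256, 0]): A returns False, B returns True; on check_int_List_2([3, -1]): A raises ValueError, B returns True
import Mathlib
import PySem

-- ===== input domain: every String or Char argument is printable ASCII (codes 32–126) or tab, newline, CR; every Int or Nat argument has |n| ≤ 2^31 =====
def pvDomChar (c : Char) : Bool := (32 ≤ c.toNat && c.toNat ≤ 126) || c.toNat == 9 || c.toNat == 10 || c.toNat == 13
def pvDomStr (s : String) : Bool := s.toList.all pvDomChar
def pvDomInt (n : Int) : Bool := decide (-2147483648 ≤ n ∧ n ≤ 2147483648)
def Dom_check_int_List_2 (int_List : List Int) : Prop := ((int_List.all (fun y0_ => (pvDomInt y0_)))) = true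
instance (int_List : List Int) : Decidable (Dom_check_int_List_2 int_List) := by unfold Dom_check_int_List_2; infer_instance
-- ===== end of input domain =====

-- B replaces A's double loop over ordered pairs of list entries (with per-pair string
-- re-encoding and 8-character comparisons) by a one-pass 256-entry presence table followed
-- by a single scan of the fixed value universe that, for each present u, checks only the
-- submasks s < u (s &&& u = s is the integer form of domination); return-value equivalence
-- is proved on the natural domain 0 ≤ v < 2^m = 256.

-- ===== PORT A =====
-- format(val_int, "b").zfill(m) with m = 8
def integer_to_bin (val_int : Int) : List Char :=
  PySem.Chars.zfill (PySem.Int.toBinChars val_int) 8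

-- int(alt[i]) for the characters of a zfilled binary string: exact on digit characters,
-- the only ones reached inside Pre_ (on '-' Python raises ValueError, excluded by Pre_)
def pvIntChar (c : Char) : Int := (PySem.Int.ofChars? [c]).getD 0

-- the comprehension [int(alt[i]) for i in range(m)] (zfill guarantees length ≥ 8, so the
-- index is always in range and the getD default is never used)
def pvVec (alt : List Char) : List Int := (List.range 8).map (fun i => pvIntChar (alt.getD i ' '))

def check_int_List_2 (int_List : List Int) : Bool :=
  let A_binary_encoding_list := int_List.map (fun val_int => integer_to_bin val_int)
  !(A_binary_encoding_list.any (fun alt1 =>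
      A_binary_encoding_list.any (fun alt2 =>
        decide (alt2 ≠ alt1) &&
          (let alt1_int := pvVec alt1
           let alt2_int := pvVec alt2
           ((List.range 8).all (fun i => decide (alt1_int.getD i 0 ≥ alt2_int.getD i 0)) ||
            (List.range 8).all (fun i => decide (alt2_int.getD i 0 ≥ alt1_int.getD i 0)))))))

-- ===== PORT B =====
-- present = set(int_List); then scan u over range(256), s over range(u) testing membership
def check_int_List_2_alt (int_List : List Int) : Bool :=
  let present := PySem.Set.ofList int_List
  !((List.range 256).any (fun u =>
      present.contains ((u : Nat) : Int) &&
        (List.range u).any (fun s => present.contains ((s : Nat) : Int) && ((s &&& u) == s))))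

-- ===== PRECONDITION & SPEC =====
-- Pre_ restricts to the natural domain of the m = 8 binary criteria encodings, 0 ≤ v < 2^m:
-- on negative values A raises ValueError (int('-') on the sign character) as soon as two
-- distinct values are compared, and on values ≥ 256 A compares only the first 8 characters
-- of a longer binary string — an accidental prefix comparison, not the 8-bit encoding —
-- while B's scan of the 0..255 universe ignores such values. Lists whose elements are all
-- equal are additionally admitted whatever the values: no distinct pair exists, so both
-- programs return True without comparing anything.
def Pre_check_int_List_2 (int_List : List Int) : Prop :=
  (∀ v ∈ int_List, 0 ≤ v ∧ v < 256) ∨ (∀ v ∈ int_List, ∀ w ∈ int_List, v = w)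
instance (int_List : List Int) : Decidable (Pre_check_int_List_2 int_List) := by unfold Pre_check_int_List_2; infer_instance
def pvWitness_check_int_List_2 : List Int := [3, 5, 6]
def Spec_check_int_List_2 (int_List : List Int) (out : Bool) : Prop := out = check_int_List_2_alt int_List
instance (int_List : List Int) (out : Bool) : Decidable (Spec_check_int_List_2 int_List out) := by unfold Spec_check_int_List_2; infer_instance

-- ===== CLAIM (what is proved, stated in full; the proofs are below) =====
def Claim_equal_check_int_List_2 : Prop := ∀ (int_List : List Int), Dom_check_int_List_2 int_List → Pre_check_int_List_2 int_List → Spec_check_int_List_2 int_List (check_int_List_2 int_List)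

-- ===== LEMMAS AND PROOFS =====

-- the 8-bit vector of n, most significant bit first
def pvBits (n : Nat) : List Int :=
  [if n.testBit 7 then 1 else 0, if n.testBit 6 then 1 else 0, if n.testBit 5 then 1 else 0,
   if n.testBit 4 then 1 else 0, if n.testBit 3 then 1 else 0, if n.testBit 2 then 1 else 0,
   if n.testBit 1 then 1 else 0, if n.testBit 0 then 1 else 0]

set_option maxRecDepth 10000 in
theorem pvVec_bin_fin : ∀ p : Fin 256, pvVec (integer_to_bin (p.val : Int)) = pvBits p.val := by decide

theorem pvVec_bin (n : Nat) (h : n < 256) : pvVec (integer_to_bin (n : Int)) = pvBits n :=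
  pvVec_bin_fin ⟨n, h⟩

theorem pvBitval_inj (p q : Bool) (h : (if p then (1:Int) else 0) = (if q then 1 else 0)) : p = q := by
  cases p <;> cases q <;> simp_all

theorem pvBits_inj (a b : Nat) (ha : a < 256) (hb : b < 256) (h : pvBits a = pvBits b) : a = b := by
  simp only [pvBits, List.cons.injEq, and_true] at h
  obtain ⟨h7, h6, h5, h4, h3, h2, h1, h0⟩ := h
  apply Nat.eq_of_testBit_eq
  intro i
  by_cases hi : i < 8
  · interval_cases i
    · exact pvBitval_inj _ _ h0
    · exact pvBitval_inj _ _ h1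
    · exact pvBitval_inj _ _ h2
    · exact pvBitval_inj _ _ h3
    · exact pvBitval_inj _ _ h4
    · exact pvBitval_inj _ _ h5
    · exact pvBitval_inj _ _ h6
    · exact pvBitval_inj _ _ h7
  · have h2i : (256 : Nat) ≤ 2 ^ i := by
      calc (256:Nat) = 2 ^ 8 := by norm_num
      _ ≤ 2 ^ i := Nat.pow_le_pow_right (by norm_num) (by omega)
    rw [Nat.testBit_lt_two_pow (lt_of_lt_of_le ha h2i),
        Nat.testBit_lt_two_pow (lt_of_lt_of_le hb h2i)]

theorem pvLand_iff (a b : Nat) (hb : b < 256) :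
    a &&& b = b ↔ (∀ i, i < 8 → (b.testBit i = true → a.testBit i = true)) := by
  constructor
  · intro h i _ hbit
    have := congrArg (fun m => Nat.testBit m i) h
    simp only [Nat.testBit_and, hbit, Bool.and_true] at this
    exact this
  · intro h
    apply Nat.eq_of_testBit_eq
    intro i
    rw [Nat.testBit_and]
    by_cases hi : i < 8
    · cases hbi : b.testBit i
      · simp
      · simp [h i hi hbi]
    · have h2i : (256 : Nat) ≤ 2 ^ i := by
        calc (256:Nat) = 2 ^ 8 := by norm_num
        _ ≤ 2 ^ i := Nat.pow_le_pow_right (by norm_num) (by omega)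
      rw [Nat.testBit_lt_two_pow (lt_of_lt_of_le hb h2i)]
      simp

theorem pvGeBit (p q : Bool) :
    decide ((if p then (1:Int) else 0) ≥ (if q then 1 else 0)) = (!q || p) := by
  cases p <;> cases q <;> decide

theorem pvAllGeBand (a b : Nat) (_ha : a < 256) (hb : b < 256) :
    (List.range 8).all (fun i => decide ((pvBits a).getD i 0 ≥ (pvBits b).getD i 0))
      = (a &&& b == b) := by
  rw [show List.range 8 = [0,1,2,3,4,5,6,7] from by decide]
  simp only [List.all_cons, List.all_nil, pvBits, List.getD_cons_zero, List.getD_cons_succ,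
    pvGeBit, Bool.and_true]
  rw [Bool.eq_iff_iff]
  simp only [Bool.and_eq_true, Bool.or_eq_true, Bool.not_eq_eq_eq_not, Bool.not_true,
    beq_iff_eq]
  rw [pvLand_iff a b hb]
  constructor
  · intro h i hi hbit
    obtain ⟨c7, c6, c5, c4, c3, c2, c1, c0⟩ := h
    interval_cases i
    · rcases c0 with h' | h' <;> simp_all
    · rcases c1 with h' | h' <;> simp_all
    · rcases c2 with h' | h' <;> simp_all
    · rcases c3 with h' | h' <;> simp_all
    · rcases c4 with h' | h' <;> simp_all
    · rcases c5 with h' | h' <;> simp_all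
    · rcases c6 with h' | h' <;> simp_all
    · rcases c7 with h' | h' <;> simp_all
  · intro h
    refine ⟨?_, ?_, ?_, ?_, ?_, ?_, ?_, ?_⟩
    · cases hbi : b.testBit 7
      · exact Or.inl rfl
      · exact Or.inr (h 7 (by omega) hbi)
    · cases hbi : b.testBit 6
      · exact Or.inl rfl
      · exact Or.inr (h 6 (by omega) hbi)
    · cases hbi : b.testBit 5
      · exact Or.inl rfl
      · exact Or.inr (h 5 (by omega) hbi)
    · cases hbi : b.testBit 4
      · exact Or.inl rfl
      · exact Or.inr (h 4 (by omega) hbi)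
    · cases hbi : b.testBit 3
      · exact Or.inl rfl
      · exact Or.inr (h 3 (by omega) hbi)
    · cases hbi : b.testBit 2
      · exact Or.inl rfl
      · exact Or.inr (h 2 (by omega) hbi)
    · cases hbi : b.testBit 1
      · exact Or.inl rfl
      · exact Or.inr (h 1 (by omega) hbi)
    · cases hbi : b.testBit 0
      · exact Or.inl rfl
      · exact Or.inr (h 0 (by omega) hbi)

theorem pvBin_inj (a b : Nat) (ha : a < 256) (hb : b < 256)
    (h : integer_to_bin (a : Int) = integer_to_bin (b : Int)) : a = b := by
  apply pvBits_inj a b ha hb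
  rw [← pvVec_bin a ha, ← pvVec_bin b hb, h]

-- the inner loop-body condition of A, in integer (Nat bitwise-and) form
theorem pvPair_eq (u v : Int) (hu0 : 0 ≤ u) (hu : u < 256) (hv0 : 0 ≤ v) (hv : v < 256) :
    (decide (integer_to_bin v ≠ integer_to_bin u) &&
      ((List.range 8).all (fun i => decide ((pvVec (integer_to_bin u)).getD i 0 ≥ (pvVec (integer_to_bin v)).getD i 0)) ||
       (List.range 8).all (fun i => decide ((pvVec (integer_to_bin v)).getD i 0 ≥ (pvVec (integer_to_bin u)).getD i 0))))
    = (decide (u ≠ v) && ((u.toNat &&& v.toNat == v.toNat) || (v.toNat &&& u.toNat == u.toNat))) := by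
  obtain ⟨a, rfl⟩ : ∃ a : Nat, u = (a : Int) := ⟨u.toNat, (Int.toNat_of_nonneg hu0).symm⟩
  obtain ⟨b, rfl⟩ : ∃ b : Nat, v = (b : Int) := ⟨v.toNat, (Int.toNat_of_nonneg hv0).symm⟩
  have ha : a < 256 := by exact_mod_cast hu
  have hb : b < 256 := by exact_mod_cast hv
  rw [pvVec_bin a ha, pvVec_bin b hb, pvAllGeBand a b ha hb, pvAllGeBand b a hb ha]
  have hne : decide (integer_to_bin (b:Int) ≠ integer_to_bin (a:Int)) = decide ((a:Int) ≠ (b:Int)) := by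
    rw [decide_eq_decide]
    constructor
    · intro h h'; exact h (by rw [h'])
    · intro h h'; exact h (by exact_mod_cast (pvBin_inj b a hb ha h').symm)
  rw [hne]
  simp [Int.toNat_natCast]

theorem check_agree_const (int_List : List Int)
    (hc : ∀ v ∈ int_List, ∀ w ∈ int_List, v = w) :
    check_int_List_2 int_List = check_int_List_2_alt int_List := by
  unfold check_int_List_2 check_int_List_2_alt
  simp only []
  congr 1
  rw [Bool.eq_iff_iff]
  simp only [List.any_eq_true, List.mem_map, List.mem_range]
  constructor
  · rintro ⟨c1, ⟨u, hu, rfl⟩, c2, ⟨v, hv, rfl⟩, hcond⟩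
    rw [hc v hv u hu] at hcond
    simp at hcond
  · rintro ⟨U, _hU, hrest⟩
    rw [Bool.and_eq_true] at hrest
    obtain ⟨hUp, hany⟩ := hrest
    rw [List.any_eq_true] at hany
    obtain ⟨S, hSU, hSrest⟩ := hany
    rw [List.mem_range] at hSU
    rw [Bool.and_eq_true] at hSrest
    obtain ⟨hSp, _⟩ := hSrest
    have hUm : ((U : Nat) : Int) ∈ int_List :=
      (PySem.Set.mem_ofList _ _).mp ((PySem.Set.contains_iff _ _).mp hUp)
    have hSm : ((S : Nat) : Int) ∈ int_List :=
      (PySem.Set.mem_ofList _ _).mp ((PySem.Set.contains_iff _ _).mp hSp)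
    have := hc _ hUm _ hSm
    omega

theorem check_agree_bounded (int_List : List Int)
    (hpre : ∀ v ∈ int_List, 0 ≤ v ∧ v < 256) :
    check_int_List_2 int_List = check_int_List_2_alt int_List := by
  unfold check_int_List_2 check_int_List_2_alt
  simp only []
  congr 1
  rw [Bool.eq_iff_iff]
  simp only [List.any_eq_true, List.mem_map, List.mem_range]
  have htbl : ∀ x : Int,
      ((PySem.Set.ofList int_List).contains x = true) ↔ x ∈ int_List := by
    intro x
    rw [PySem.Set.contains_iff, PySem.Set.mem_ofList]
  constructor
  · rintro ⟨c1, ⟨u, hu, rfl⟩, c2, ⟨v, hv, rfl⟩, hcond⟩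
    obtain ⟨hu0, hu256⟩ := hpre u hu
    obtain ⟨hv0, hv256⟩ := hpre v hv
    rw [pvPair_eq u v hu0 hu256 hv0 hv256] at hcond
    simp only [Bool.and_eq_true, Bool.or_eq_true, decide_eq_true_eq, beq_iff_eq] at hcond
    obtain ⟨hne, hdom⟩ := hcond
    have hneN : u.toNat ≠ v.toNat := by
      intro h; exact hne (by omega)
    rcases hdom with h | h
    · -- v's vector is a submask of u's: take U = u.toNat, S = v.toNat
      have hle : v.toNat ≤ u.toNat := h ▸ Nat.and_le_left
      refine ⟨u.toNat, by omega, ?_⟩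
      rw [Bool.and_eq_true]
      refine ⟨(htbl _).mpr (by rw [show ((u.toNat : Nat) : Int) = u by omega]; exact hu), ?_⟩
      rw [List.any_eq_true]
      refine ⟨v.toNat, List.mem_range.mpr (by omega), ?_⟩
      rw [Bool.and_eq_true]
      exact ⟨(htbl _).mpr (by rw [show ((v.toNat : Nat) : Int) = v by omega]; exact hv),
        by rw [beq_iff_eq, Nat.land_comm]; exact h⟩
    · have hle : u.toNat ≤ v.toNat := h ▸ Nat.and_le_left
      refine ⟨v.toNat, by omega, ?_⟩
      rw [Bool.and_eq_true]
      refine ⟨(htbl _).mpr (by rw [show ((v.toNat : Nat) : Int) = v by omega]; exact hv), ?_⟩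
      rw [List.any_eq_true]
      refine ⟨u.toNat, List.mem_range.mpr (by omega), ?_⟩
      rw [Bool.and_eq_true]
      exact ⟨(htbl _).mpr (by rw [show ((u.toNat : Nat) : Int) = u by omega]; exact hu),
        by rw [beq_iff_eq, Nat.land_comm]; exact h⟩
  · rintro ⟨U, _hU, hrest⟩
    rw [Bool.and_eq_true] at hrest
    obtain ⟨hUp, hany⟩ := hrest
    rw [List.any_eq_true] at hany
    obtain ⟨S, hSU, hSrest⟩ := hany
    rw [List.mem_range] at hSU
    rw [Bool.and_eq_true, beq_iff_eq] at hSrest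
    obtain ⟨hSp, hsub⟩ := hSrest
    have hu : ((U : Nat) : Int) ∈ int_List := (htbl _).mp hUp
    have hv : ((S : Nat) : Int) ∈ int_List := (htbl _).mp hSp
    obtain ⟨hu0, hu256⟩ := hpre _ hu
    obtain ⟨hv0, hv256⟩ := hpre _ hv
    refine ⟨integer_to_bin ((U : Nat) : Int), ⟨_, hu, rfl⟩, integer_to_bin ((S : Nat) : Int), ⟨_, hv, rfl⟩, ?_⟩
    rw [pvPair_eq _ _ hu0 hu256 hv0 hv256]
    simp only [Bool.and_eq_true, Bool.or_eq_true, decide_eq_true_eq, beq_iff_eq,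
      Int.toNat_natCast]
    exact ⟨by omega, Or.inl (by rw [Nat.land_comm]; exact hsub)⟩

-- ===== VERDICT (by name: the statement is the Claim_ definition above) =====
theorem check_int_List_2_spec : Claim_equal_check_int_List_2 := by
  intro int_List _hdom hpre
  unfold Spec_check_int_List_2
  rcases hpre with h | h
  · exact check_agree_bounded int_List h
  · exact check_agree_const int_List h
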